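-- pv_equiv track=rewrite | github.com/shiragold/DoubleOrient | Process/DoubleOrient.py | _select_cc
-- ===== SOURCE A (Python) =====
-- def _select_cc(cube, start):
-- 	used = [start]
-- 	q = [start]
-- 	while q:
-- 		curr = q.pop()
-- 		curr_neighbours = _neighbours3d(cube, curr[0], curr[1], curr[2])
-- 		for n in curr_neighbours:
-- 			if n not in used:
-- 				used.append(n)
-- 				q.insert(0, n)
-- 	return used
--
-- def _neighbours3d(cube, i, j, k):
-- 	N = len(cube)
-- 	n = []
-- 	for it in range(max(i-1, 0), min(i+2, N)):
-- 			for jt in range(max(j-1, 0), min(j+2, N)):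
-- 				for kt in range(max(k-1,0), min(k+2, N)):
-- 					if cube[it][jt][kt] and (it,jt,kt) != (i,j,k):
-- 						n.append((it,jt,kt))
-- 	return n
-- ===== SOURCE B (Python) =====
-- _OFFSETS = [(di, dj, dk)
--             for di in (-1, 0, 1) for dj in (-1, 0, 1) for dk in (-1, 0, 1)
--             if (di, dj, dk) != (0, 0, 0)]
--
-- def _select_cc(cube, start):
--     N = len(cube)
--
--     def grow(order, level):
--         # gather every in-bounds active neighbour of the whole level, duplicates and all
--         cand = [(i + di, j + dj, k + dk)
--                 for (i, j, k) in level
--                 for (di, dj, dk) in _OFFSETS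
--                 if 0 <= i + di < N and 0 <= j + dj < N and 0 <= k + dk < N
--                 and cube[i + di][j + dj][k + dk]]
--         # second pass: keep the first occurrence of each cell not already collected
--         nxt = []
--         for c in cand:
--             if c not in order and c not in nxt:
--                 nxt.append(c)
--         return order if not nxt else grow(order + nxt, nxt)
--
--     return grow([start], [start])
-- ===== Notes on version B (the rewrite author's own statement) =====
-- stated objective: alternative
-- what changed: Replaces the destructive queue loop (q.pop(), q.insert(0,..), in-place appends) and the triple clipped-range neighbour scan by a recursive level expansion: each level's candidates are produced in one comprehension from a fixed 26-offset table with bounds filtering, deduplicated in a separate second pass, and the function recurses on the new level; same discovery order, no queue and no neighbour helper.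
import Mathlib
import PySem

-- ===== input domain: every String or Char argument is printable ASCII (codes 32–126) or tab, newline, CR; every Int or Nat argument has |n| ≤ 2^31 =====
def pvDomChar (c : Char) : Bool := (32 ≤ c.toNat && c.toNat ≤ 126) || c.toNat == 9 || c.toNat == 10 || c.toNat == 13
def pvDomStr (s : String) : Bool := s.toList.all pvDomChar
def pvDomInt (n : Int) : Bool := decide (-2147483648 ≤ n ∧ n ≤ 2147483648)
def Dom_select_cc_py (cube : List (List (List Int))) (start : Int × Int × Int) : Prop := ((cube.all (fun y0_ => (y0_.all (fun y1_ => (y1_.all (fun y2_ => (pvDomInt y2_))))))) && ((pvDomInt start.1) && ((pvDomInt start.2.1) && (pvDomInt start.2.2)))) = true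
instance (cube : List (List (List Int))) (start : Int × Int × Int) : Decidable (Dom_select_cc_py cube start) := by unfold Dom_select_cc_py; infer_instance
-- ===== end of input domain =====

-- B replaces A's destructive queue loop (q.pop(), q.insert(0,..)) and clipped triple-range
-- neighbour scan by a recursive level expansion over a fixed 26-offset table with a separate
-- dedup pass; same discovery order, hence the same return value (objective: alternative).

-- ===== PORT A =====

-- A's helper `_neighbours3d`: triple loop over clipped ranges.
-- cube[it][jt][kt] is ported as pyGetD with defaults: exact under Pre_select_cc_py, where every
-- index reached lies in range (outside Pre_ the Python raises IndexError).
def neighbours3d (cube : List (List (List Int))) (i j k : Int) : List (Int × Int × Int) :=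
  let N : Int := (cube.length : Int)
  (PySem.List.pyRange (max (i-1) 0) (min (i+2) N) 1).foldl (fun n it =>
    (PySem.List.pyRange (max (j-1) 0) (min (j+2) N) 1).foldl (fun n jt =>
      (PySem.List.pyRange (max (k-1) 0) (min (k+2) N) 1).foldl (fun n kt =>
        if (PySem.List.pyGetD (PySem.List.pyGetD (PySem.List.pyGetD cube it []) jt []) kt 0 != 0)
             && (((it,jt,kt) : Int × Int × Int) != (i,j,k))
        then n ++ [(it,jt,kt)] else n) n) n) []

-- A's loop body for one neighbour n: `if n not in used: used.append(n); q.insert(0, n)`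
def aStep (st : List (Int × Int × Int) × List (Int × Int × Int)) (n : Int × Int × Int) :
    List (Int × Int × Int) × List (Int × Int × Int) :=
  if n ∈ st.1 then st else (st.1 ++ [n], PySem.List.insert st.2 0 n)

-- ----- proof-side helpers needed by the ports' fuel (an upper bound on the loop/level count) -----
def validL (cube : List (List (List Int))) : List (Int × Int × Int) :=
  (PySem.List.pyRange 0 (cube.length : Int) 1).flatMap (fun a =>
    (PySem.List.pyRange 0 (cube.length : Int) 1).flatMap (fun b =>
      (PySem.List.pyRange 0 (cube.length : Int) 1).map (fun c => (a, b, c))))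

def Km (cube : List (List (List Int))) (seen : List (Int × Int × Int)) : Nat :=
  ((validL cube).toFinset \ seen.toFinset).card

-- A's while-loop: `while q: curr = q.pop(); …` — q.pop() pops the LAST element
-- (getLast + dropLast, exact for a nonempty list); the for-loop over the neighbours is aStep.
def aLoop (cube : List (List (List Int))) : Nat → List (Int × Int × Int) → List (Int × Int × Int) → List (Int × Int × Int)
  | 0, used, _ => used   -- fuel guard only; select_cc_py passes fuel exceeding the loop's step count
  | f+1, used, q =>
    if h : q = [] then used
    else
      let curr := q.getLast h
      let st := (neighbours3d cube curr.1 curr.2.1 curr.2.2).foldl aStep (used, q.dropLast)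
      aLoop cube f st.1 st.2

def select_cc_py (cube : List (List (List Int))) (start : Int × Int × Int) : List (Int × Int × Int) :=
  aLoop cube (2 * Km cube [start] + 2) [start] [start]

-- ===== PORT B =====
-- Source B: module constant _OFFSETS — the 26 non-zero offsets, in the comprehension's order.
def offsets : List (Int × Int × Int) :=
  ([-1,0,1] : List Int).flatMap (fun di =>
    ([-1,0,1] : List Int).flatMap (fun dj =>
      ([-1,0,1] : List Int).flatMap (fun dk =>
        if ((di,dj,dk) : Int × Int × Int) = (0,0,0) then [] else [(di,dj,dk)])))

-- the candidate comprehension's body for one level node p and one offset d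
def cand1 (cube : List (List (List Int))) (N : Int) (p : Int × Int × Int) : List (Int × Int × Int) :=
  offsets.flatMap (fun d =>
    if (0 ≤ p.1 + d.1 ∧ p.1 + d.1 < N) ∧ (0 ≤ p.2.1 + d.2.1 ∧ p.2.1 + d.2.1 < N)
        ∧ (0 ≤ p.2.2 + d.2.2 ∧ p.2.2 + d.2.2 < N)
        ∧ PySem.List.pyGetD (PySem.List.pyGetD (PySem.List.pyGetD cube (p.1 + d.1) []) (p.2.1 + d.2.1) []) (p.2.2 + d.2.2) 0 ≠ 0
    then [(p.1 + d.1, p.2.1 + d.2.1, p.2.2 + d.2.2)] else [])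

-- Source B's second pass: `for c in cand: if c not in order and c not in nxt: nxt.append(c)`
def dedupe (order : List (Int × Int × Int)) (cand : List (Int × Int × Int)) : List (Int × Int × Int) :=
  cand.foldl (fun nxt c => if c ∈ order ∨ c ∈ nxt then nxt else nxt ++ [c]) []

-- Source B's recursive `grow(order, level)`
def grow (cube : List (List (List Int))) (N : Int) : Nat → List (Int × Int × Int) → List (Int × Int × Int) → List (Int × Int × Int)
  | 0, order, _ => order   -- fuel guard only; select_cc_py_alt passes fuel exceeding the recursion depth
  | f+1, order, level =>
    let nxt := dedupe order (level.flatMap (cand1 cube N))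
    if nxt = [] then order else grow cube N f (order ++ nxt) nxt

def select_cc_py_alt (cube : List (List (List Int))) (start : Int × Int × Int) : List (Int × Int × Int) :=
  grow cube (cube.length : Int) (2 * Km cube [start] + 2) [start] [start]

-- ===== PRECONDITION & SPEC =====
-- Pre_ requires every plane/row to have at least N = len(cube) entries (the only indices the scan
-- can touch) unless the start is too far outside [0,N) for any neighbour range to be non-empty:
-- on shorter ragged cubes the Python (A and B alike) raises IndexError whenever the search reaches
-- a missing cell — a condition not statable without running the search — and on the few such cubes
-- whose missing cells the component never reaches, A and B return the same value (see claim cites).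
def Pre_select_cc_py (cube : List (List (List Int))) (start : Int × Int × Int) : Prop :=
  (∀ p ∈ cube, (cube.length ≤ p.length) ∧ ∀ r ∈ p, cube.length ≤ r.length)
  ∨ (start.1 ≤ -2 ∨ (cube.length : Int) + 1 ≤ start.1
     ∨ start.2.1 ≤ -2 ∨ (cube.length : Int) + 1 ≤ start.2.1
     ∨ start.2.2 ≤ -2 ∨ (cube.length : Int) + 1 ≤ start.2.2)
instance (cube : List (List (List Int))) (start : Int × Int × Int) : Decidable (Pre_select_cc_py cube start) := by unfold Pre_select_cc_py; infer_instance

def pvWitness_select_cc_py : List (List (List Int)) × (Int × Int × Int) :=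
  ([[[1,1],[0,1]],[[1,0],[1,1]]], (0,0,0))

def Spec_select_cc_py (cube : List (List (List Int))) (start : Int × Int × Int) (out : List (Int × Int × Int)) : Prop := out = select_cc_py_alt cube start
instance (cube : List (List (List Int))) (start : Int × Int × Int) (out : List (Int × Int × Int)) : Decidable (Spec_select_cc_py cube start out) := by unfold Spec_select_cc_py; infer_instance

-- ===== CLAIM (what is proved, stated in full; the proofs are below) =====
def Claim_equal_select_cc_py : Prop := ∀ (cube : List (List (List Int))) (start : Int × Int × Int), Dom_select_cc_py cube start → Pre_select_cc_py cube start → Spec_select_cc_py cube start (select_cc_py cube start)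

-- ===== LEMMAS AND PROOFS =====

-- the canonical nested-flatMap form both neighbour scans are reduced to
def canon (cube : List (List (List Int))) (N i j k : Int) : List (Int × Int × Int) :=
  (PySem.List.pyRange (max (i-1) 0) (min (i+2) N) 1).flatMap (fun it =>
    (PySem.List.pyRange (max (j-1) 0) (min (j+2) N) 1).flatMap (fun jt =>
      (PySem.List.pyRange (max (k-1) 0) (min (k+2) N) 1).flatMap (fun kt =>
        if PySem.List.pyGetD (PySem.List.pyGetD (PySem.List.pyGetD cube it []) jt []) kt 0 ≠ 0
            ∧ ((it,jt,kt) : Int × Int × Int) ≠ (i,j,k)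
        then [(it,jt,kt)] else [])))

lemma filter_map_eq_flatMap {α β : Type} (l : List α) (q : α → Bool) (f : α → β) :
    (l.filter q).map f = l.flatMap (fun x => if q x then [f x] else []) := by
  induction l with
  | nil => rfl
  | cons x t ih => cases hq : q x <;> simp [hq, ih]

-- a clipped range, consumed by flatMap, is the unclipped range with a bounds guard
lemma clip_flatMap {α : Type} (c d : Int) (F : Int → List α) :
    ∀ (n : Nat) (a b : Int), (b - a).toNat ≤ n →
    (PySem.List.pyRange (max a c) (min b d) 1).flatMap F
      = (PySem.List.pyRange a b 1).flatMap (fun x => if c ≤ x ∧ x < d then F x else []) := by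
  intro n
  induction n with
  | zero =>
    intro a b h
    rw [PySem.List.pyRange_one_eq_nil (by omega : b ≤ a),
        PySem.List.pyRange_one_eq_nil (by omega : min b d ≤ max a c)]
    simp
  | succ n ih =>
    intro a b h
    by_cases hab : b ≤ a
    · rw [PySem.List.pyRange_one_eq_nil hab,
          PySem.List.pyRange_one_eq_nil (by omega : min b d ≤ max a c)]
      simp
    · rw [not_le] at hab
      rw [PySem.List.pyRange_one_cons hab]
      by_cases hc : c ≤ a ∧ a < d
      · have hmax : max a c = a := by omega
        have h2 : a < min b d := by omega
        rw [hmax, PySem.List.pyRange_one_cons h2]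
        have hmax2 : max (a+1) c = a + 1 := by omega
        simp only [List.flatMap_cons, if_pos hc]
        rw [← hmax2, ih (a+1) b (by omega), hmax2]
      · simp only [List.flatMap_cons, if_neg hc, List.nil_append]
        rw [← ih (a+1) b (by omega)]
        by_cases hd : d ≤ a
        · rw [PySem.List.pyRange_one_eq_nil (by omega : min b d ≤ max a c),
              PySem.List.pyRange_one_eq_nil (by omega : min b d ≤ max (a+1) c)]
        · have hm : max a c = max (a+1) c := by omega
          rw [hm]

lemma range3 (x : Int) : PySem.List.pyRange (x-1) (x+2) 1 = [x-1, x, x+1] := by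
  rw [PySem.List.pyRange_one_cons (by omega : x-1 < x+2)]
  have e1 : x - 1 + 1 = x := by ring
  rw [e1, PySem.List.pyRange_one_cons (by omega : x < x+2),
      PySem.List.pyRange_one_cons (by omega : x+1 < x+2),
      PySem.List.pyRange_one_eq_nil (by omega : x+2 ≤ x+1+1)]

-- one dimension of B's offset loop equals A's clipped range
lemma dim_eq {α : Type} (x N : Int) (G : Int → List α) :
    ([-1,0,1] : List Int).flatMap (fun d => if 0 ≤ x + d ∧ x + d < N then G (x + d) else [])
      = (PySem.List.pyRange (max (x-1) 0) (min (x+2) N) 1).flatMap G := by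
  rw [clip_flatMap 0 N G (x+2-(x-1)).toNat (x-1) (x+2) le_rfl, range3]
  have e1 : x + (-1) = x - 1 := by ring
  simp only [List.flatMap_cons, List.flatMap_nil, e1, add_zero, List.append_nil]

-- B's per-node candidate list equals A's neighbour list (canonical form)
lemma flatMap_ite {α β : Type} (c : Prop) [Decidable c] (x : α) (g : α → List β) :
    (if c then ([] : List α) else [x]).flatMap g = if c then [] else g x := by
  split_ifs <;> simp

lemma ite_flatMap {α β : Type} (c : Prop) [Decidable c] (l : List α) (g : α → List β) :
    (if c then l.flatMap g else []) = l.flatMap (fun x => if c then g x else []) := by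
  split_ifs <;> simp

lemma cand1_eq_canon (cube : List (List (List Int))) (N : Int) (p : Int × Int × Int) :
    cand1 cube N p = canon cube N p.1 p.2.1 p.2.2 := by
  obtain ⟨i, j, k⟩ := p
  show cand1 cube N (i, j, k) = canon cube N i j k
  unfold cand1 offsets canon
  simp only [← dim_eq, List.flatMap_assoc, flatMap_ite, ite_flatMap]
  congr 1
  funext di
  congr 1
  funext dj
  congr 1
  funext dk
  have hne : (((i + di, j + dj, k + dk) : Int × Int × Int) ≠ (i, j, k))
      ↔ ¬(((di, dj, dk) : Int × Int × Int) = ((0, 0, 0) : Int × Int × Int)) := by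
    simp only [Prod.ext_iff, ne_eq, not_and]
    omega
  split_ifs <;> simp_all

lemma neighbours3d_eq_canon (cube : List (List (List Int))) (i j k : Int) :
    neighbours3d cube i j k = canon cube (cube.length : Int) i j k := by
  unfold neighbours3d canon
  simp only [PySem.List.foldl_append_if, PySem.List.foldl_append_eq_flatMap, List.nil_append]
  congr 1
  funext it
  congr 1
  funext jt
  rw [filter_map_eq_flatMap]
  congr 1
  funext kt
  simp [bne_iff_ne]

-- the sequence of fresh nodes a scan of `ns` appends, given the already-seen list
def newsOf (seen ns : List (Int × Int × Int)) : List (Int × Int × Int) :=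
  match ns with
  | [] => []
  | n :: t => if n ∈ seen then newsOf seen t else n :: newsOf (seen ++ [n]) t

lemma mem_newsOf {seen ns : List (Int × Int × Int)} {x : Int × Int × Int}
    (hx : x ∈ newsOf seen ns) : x ∈ ns ∧ x ∉ seen := by
  induction ns generalizing seen with
  | nil => simp [newsOf] at hx
  | cons n t ih =>
    unfold newsOf at hx
    split at hx
    · rcases ih hx with ⟨h1, h2⟩; exact ⟨List.mem_cons_of_mem _ h1, h2⟩
    · rcases List.mem_cons.1 hx with h | h
      · subst h; simp_all
      · rcases ih h with ⟨h1, h2⟩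
        simp only [List.mem_append, List.mem_singleton, not_or] at h2
        exact ⟨List.mem_cons_of_mem _ h1, h2.1⟩

lemma nodup_newsOf (seen ns : List (Int × Int × Int)) : (newsOf seen ns).Nodup := by
  induction ns generalizing seen with
  | nil => simp [newsOf]
  | cons n t ih =>
    unfold newsOf
    split
    · exact ih seen
    · refine List.nodup_cons.2 ⟨fun hmem => ?_, ih (seen ++ [n])⟩
      have := (mem_newsOf hmem).2
      simp at this

lemma newsOf_append (v xs ys : List (Int × Int × Int)) :
    newsOf v (xs ++ ys) = newsOf v xs ++ newsOf (v ++ newsOf v xs) ys := by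
  induction xs generalizing v with
  | nil => simp [newsOf]
  | cons n t ih =>
    by_cases h : n ∈ v
    · simp only [List.cons_append, newsOf, if_pos h, ih]
    · simp only [List.cons_append, newsOf, if_neg h, ih, List.cons_append, List.append_assoc]
      rfl

lemma mem_neighbours3d_valid {cube : List (List (List Int))} {i j k : Int}
    {x : Int × Int × Int} (hx : x ∈ neighbours3d cube i j k) : x ∈ validL cube := by
  simp only [neighbours3d, PySem.List.foldl_append_if, PySem.List.foldl_append_eq_flatMap,
    List.nil_append, List.mem_flatMap, List.mem_map, List.mem_filter,
    PySem.List.mem_pyRange_one] at hx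
  obtain ⟨it, ⟨hit1, hit2⟩, jt, ⟨hjt1, hjt2⟩, kt, ⟨⟨hkt1, hkt2⟩, -⟩, rfl⟩ := hx
  simp only [validL, List.mem_flatMap, List.mem_map, PySem.List.mem_pyRange_one]
  exact ⟨it, by omega, jt, by omega, kt, by omega, rfl⟩

lemma Km_step (cube : List (List (List Int))) (seen news : List (Int × Int × Int))
    (h1 : ∀ x ∈ news, x ∈ validL cube ∧ x ∉ seen) (h2 : news.Nodup) :
    Km cube (seen ++ news) + news.length = Km cube seen := by
  have hsub : news.toFinset ⊆ (validL cube).toFinset \ seen.toFinset := by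
    intro x hx
    rw [List.mem_toFinset] at hx
    rcases h1 x hx with ⟨hv, hns⟩
    simp [Finset.mem_sdiff, List.mem_toFinset, hv, hns]
  have hset : (validL cube).toFinset \ (seen ++ news).toFinset
      = ((validL cube).toFinset \ seen.toFinset) \ news.toFinset := by
    ext y; simp [Finset.mem_sdiff]; tauto
  have hinter : news.toFinset ∩ ((validL cube).toFinset \ seen.toFinset) = news.toFinset :=
    Finset.inter_eq_left.2 hsub
  have hcard : (((validL cube).toFinset \ seen.toFinset) \ news.toFinset).card
      = ((validL cube).toFinset \ seen.toFinset).card - news.toFinset.card := by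
    rw [Finset.card_sdiff, hinter]
  have hlen : news.toFinset.card = news.length := List.toFinset_card_of_nodup h2
  have hle : news.toFinset.card ≤ ((validL cube).toFinset \ seen.toFinset).card :=
    Finset.card_le_card hsub
  unfold Km
  rw [hset, hcard]
  omega

-- characterisation of A's inner for-loop over the neighbour list (state: used, q)
lemma aFold_eq (seen q ns : List (Int × Int × Int)) :
    ns.foldl aStep (seen, q) = (seen ++ newsOf seen ns, (newsOf seen ns).reverse ++ q) := by
  induction ns generalizing seen q with
  | nil => simp [newsOf]
  | cons n t ih =>
    by_cases h : n ∈ seen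
    · have hstep : aStep (seen, q) n = (seen, q) := by simp [aStep, h]
      rw [List.foldl_cons, hstep, ih]
      simp [newsOf, h]
    · have hstep : aStep (seen, q) n = (seen ++ [n], n :: q) := by
        simp [aStep, h, PySem.List.insert_zero]
      rw [List.foldl_cons, hstep, ih]
      simp [newsOf, h, List.append_assoc]

-- the fresh nodes one whole level discovers
def lvlNews (cube : List (List (List Int))) (v F : List (Int × Int × Int)) : List (Int × Int × Int) :=
  match F with
  | [] => []
  | c :: F' =>
    let ns := newsOf v (neighbours3d cube c.1 c.2.1 c.2.2)
    ns ++ lvlNews cube (v ++ ns) F'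

lemma mem_lvlNews {cube : List (List (List Int))} {v F : List (Int × Int × Int)}
    {x : Int × Int × Int} (hx : x ∈ lvlNews cube v F) : x ∈ validL cube ∧ x ∉ v := by
  induction F generalizing v with
  | nil => simp [lvlNews] at hx
  | cons c F' ih =>
    unfold lvlNews at hx
    rcases List.mem_append.1 hx with h | h
    · exact ⟨mem_neighbours3d_valid (mem_newsOf h).1, (mem_newsOf h).2⟩
    · rcases ih h with ⟨h1, h2⟩
      simp only [List.mem_append, not_or] at h2
      exact ⟨h1, h2.1⟩

lemma nodup_lvlNews (cube : List (List (List Int))) (v F : List (Int × Int × Int)) :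
    (lvlNews cube v F).Nodup := by
  induction F generalizing v with
  | nil => simp [lvlNews]
  | cons c F' ih =>
    unfold lvlNews
    refine List.Nodup.append (nodup_newsOf _ _) (ih _) ?_
    intro x hx1 hx2
    have := (mem_lvlNews hx2).2
    simp only [List.mem_append, not_or] at this
    exact this.2 hx1

-- B's dedupe pass is newsOf
lemma dedupe_foldl (order : List (Int × Int × Int)) :
    ∀ (xs nxt : List (Int × Int × Int)),
    xs.foldl (fun nxt c => if c ∈ order ∨ c ∈ nxt then nxt else nxt ++ [c]) nxt
      = nxt ++ newsOf (order ++ nxt) xs := by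
  intro xs
  induction xs with
  | nil => intro nxt; simp [newsOf]
  | cons c t ih =>
    intro nxt
    by_cases h : c ∈ order ∨ c ∈ nxt
    · have hmem : c ∈ order ++ nxt := List.mem_append.2 h
      simp only [List.foldl_cons, if_pos h, ih, newsOf, if_pos hmem]
    · have hmem : c ∉ order ++ nxt := by
        simp only [List.mem_append]; tauto
      simp only [List.foldl_cons, if_neg h, ih, newsOf, if_neg hmem, List.append_assoc]
      rfl

-- B's whole level (gather + dedupe) computes lvlNews
lemma level_news (cube : List (List (List Int))) :
    ∀ (F v : List (Int × Int × Int)),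
    dedupe v (F.flatMap (cand1 cube (cube.length : Int))) = lvlNews cube v F := by
  intro F
  induction F with
  | nil => intro v; simp [dedupe, lvlNews]
  | cons c F' ih =>
    intro v
    have h1 : dedupe v ((c :: F').flatMap (cand1 cube (cube.length : Int)))
        = newsOf v (cand1 cube (cube.length : Int) c
            ++ F'.flatMap (cand1 cube (cube.length : Int))) := by
      unfold dedupe
      rw [dedupe_foldl v _ []]
      simp
    rw [h1, newsOf_append, cand1_eq_canon, ← neighbours3d_eq_canon]
    unfold lvlNews
    congr 1
    rw [← ih (v ++ newsOf v (neighbours3d cube c.1 c.2.1 c.2.2))]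
    unfold dedupe
    rw [dedupe_foldl _ _ []]
    simp

-- peeling a whole level off A's FIFO queue: A's Python queue q is the
-- oldest-first list (F ++ nf) reversed (q.pop() takes from the end, q.insert(0,·) puts in front).
lemma aLevel_eq (cube : List (List (List Int))) (F : List (Int × Int × Int)) :
    ∀ (used nf : List (Int × Int × Int)) (f : Nat), F.length ≤ f →
    aLoop cube f used ((F ++ nf).reverse)
      = aLoop cube (f - F.length) (used ++ lvlNews cube used F) ((nf ++ lvlNews cube used F).reverse) := by
  induction F with
  | nil => intro used nf f _; simp [lvlNews]
  | cons c F' ih =>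
    intro used nf f hf
    cases f with
    | zero => simp at hf
    | succ f' =>
      rw [List.cons_append, aLoop]
      have hne : (c :: (F' ++ nf)).reverse ≠ [] := by simp
      rw [dif_neg hne]
      have hq : (c :: (F' ++ nf)).reverse = (F' ++ nf).reverse ++ [c] := by simp
      simp only [hq, List.getLast_concat, List.dropLast_concat, aFold_eq]
      have hrw : (newsOf used (neighbours3d cube c.1 c.2.1 c.2.2)).reverse ++ (F' ++ nf).reverse
          = (F' ++ (nf ++ newsOf used (neighbours3d cube c.1 c.2.1 c.2.2))).reverse := by
        simp [List.reverse_append]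
      rw [hrw, ih _ _ f' (by simpa using hf)]
      simp [lvlNews, List.append_assoc, Nat.succ_sub_succ]

lemma main_eq (cube : List (List (List Int))) :
    ∀ (N : Nat) (used F : List (Int × Int × Int)) (f g : Nat),
    2 * Km cube used + F.length ≤ N →
    2 * Km cube used + F.length < f → 2 * Km cube used + F.length < g →
    aLoop cube f used F.reverse = grow cube (cube.length : Int) g used F := by
  intro N
  induction N with
  | zero =>
    intro used F f g hle hf hg
    have hF : F = [] := by
      cases F with
      | nil => rfl
      | cons a t => simp [List.length_cons] at hle
    subst hF
    cases f with
    | zero => omega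
    | succ f' =>
      cases g with
      | zero => omega
      | succ g' => simp [aLoop, grow, dedupe]
  | succ N ih =>
    intro used F f g hle hf hg
    by_cases hF : F = []
    · subst hF
      cases f with
      | zero => omega
      | succ f' =>
        cases g with
        | zero => omega
        | succ g' => simp [aLoop, grow, dedupe]
    · have hmem : ∀ x ∈ lvlNews cube used F, x ∈ validL cube ∧ x ∉ used :=
        fun x hx => mem_lvlNews hx
      have hK := Km_step cube used _ hmem (nodup_lvlNews cube used F)
      have hlen : 0 < F.length := List.length_pos_of_ne_nil hF
      have hA := aLevel_eq cube F used [] f (by omega)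
      simp only [List.append_nil, List.nil_append] at hA
      rw [hA]
      cases g with
      | zero => omega
      | succ g' =>
        rw [grow]
        simp only [level_news cube F used]
        by_cases hnil : lvlNews cube used F = []
        · rw [if_pos hnil, hnil]
          simp only [List.append_nil, List.reverse_nil]
          cases (f - F.length) with
          | zero => simp [aLoop]
          | succ f'' => simp [aLoop]
        · rw [if_neg hnil]
          have hlen2 : 0 < (lvlNews cube used F).length := List.length_pos_of_ne_nil hnil
          exact ih (used ++ lvlNews cube used F) (lvlNews cube used F) (f - F.length) g'
            (by omega) (by omega) (by omega)

-- ===== VERDICT (by name: the statement is the Claim_ definition above) =====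
theorem select_cc_py_spec : Claim_equal_select_cc_py := by
  intro cube start _ _
  unfold Spec_select_cc_py select_cc_py select_cc_py_alt
  have := main_eq cube (2 * Km cube [start] + 1) [start] [start]
    (2 * Km cube [start] + 2) (2 * Km cube [start] + 2) (by simp) (by simp) (by simp)
  simpa using this
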